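-- pv_equiv track=rewrite | github.com/popatam/b4n | webapp/log_parser.py | _iter_snapshot_pairs
-- ===== SOURCE A (Python) =====
-- BLOCKCHAIN_PREFIX = "BlockChain {"
--
-- MEMPOOL_PREFIX = "mempool=MemPool {"
--
-- def _iter_snapshot_pairs(lines: list[str]) -> list[tuple[str, str]]:
--     pairs: list[tuple[str, str]] = []
--
--     for idx, line in enumerate(lines):
--         if not line.startswith(BLOCKCHAIN_PREFIX):
--             continue
--
--         next_lines = lines[idx + 1 : idx + 4]
--         mempool_line = next((candidate for candidate in next_lines if candidate.startswith(MEMPOOL_PREFIX)), None)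
--         if mempool_line is None:
--             continue
--
--         pairs.append((line, mempool_line))
--
--     return pairs
-- ===== SOURCE B (Python) =====
-- BLOCKCHAIN_PREFIX = "BlockChain {"
--
-- MEMPOOL_PREFIX = "mempool=MemPool {"
--
--
-- def _iter_snapshot_pairs(lines: list[str]) -> list[tuple[str, str]]:
--     # Single pass with a queue of pending blockchain lines instead of
--     # re-slicing a three-line window for every blockchain line.
--     pairs: list[tuple[str, str]] = []
--     pending: list[tuple[str, int]] = []  # (blockchain line, remaining window + 1)
--
--     for line in lines:
--         if line.startswith(MEMPOOL_PREFIX):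
--             for bc_line, _ in pending:
--                 pairs.append((bc_line, line))
--             pending = []
--         elif line.startswith(BLOCKCHAIN_PREFIX):
--             pending.append((line, 4))
--         pending = [(bc_line, r - 1) for bc_line, r in pending if r > 1]
--
--     return pairs
-- ===== Notes on version B (the rewrite author's own statement) =====
-- stated objective: alternative
-- what changed: Replaces the per-blockchain-line three-element window slice and inner scan with one forward pass that keeps a queue of pending blockchain lines with countdown windows, emitting all still-live pending lines when a mempool line arrives.
import Mathlib
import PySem

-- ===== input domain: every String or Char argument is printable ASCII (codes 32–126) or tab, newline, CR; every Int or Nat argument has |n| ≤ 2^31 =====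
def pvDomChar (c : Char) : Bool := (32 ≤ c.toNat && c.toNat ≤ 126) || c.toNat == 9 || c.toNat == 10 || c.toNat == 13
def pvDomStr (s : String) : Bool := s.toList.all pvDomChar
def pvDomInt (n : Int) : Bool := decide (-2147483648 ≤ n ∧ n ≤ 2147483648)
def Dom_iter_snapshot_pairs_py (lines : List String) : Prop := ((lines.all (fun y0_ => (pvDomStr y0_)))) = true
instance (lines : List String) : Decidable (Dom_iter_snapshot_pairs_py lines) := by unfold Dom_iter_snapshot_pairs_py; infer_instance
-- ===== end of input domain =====

-- B replaces A's per-blockchain-line window slice and inner scan by a single pass with a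
-- queue of pending blockchain lines (alternative decomposition, same asymptotic cost).

-- module constants
def pvBlockchainPrefix : String := "BlockChain {"
def pvMempoolPrefix : String := "mempool=MemPool {"

-- ===== PORT A =====
-- loop body of A: if line starts with BLOCKCHAIN_PREFIX, scan the slice lines[idx+1:idx+4]
-- for the first mempool line (next(gen, None) = find?) and append the pair if found
def pvStepA (L : List String) (pairs : List (String × String)) (p : Int × String) :
    List (String × String) :=
  if ¬ PySem.Str.startswith p.2 pvBlockchainPrefix then pairs
  else
    match (PySem.List.slice L (some (p.1 + 1)) (some (p.1 + 4))).find?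
        (fun c => PySem.Str.startswith c pvMempoolPrefix) with
    | none => pairs
    | some m => pairs ++ [(p.2, m)]

-- for idx, line in enumerate(lines): …
def iter_snapshot_pairs_py (lines : List String) : List (String × String) :=
  (PySem.List.enumerate lines 0).foldl (pvStepA lines) []

-- ===== PORT B =====
-- the trailing decrement of Source B's loop body: [(bc, r - 1) for bc, r in pending if r > 1]
def pvDec (p : List (String × Int)) : List (String × Int) :=
  p.filterMap (fun e => if 1 < e.2 then some (e.1, e.2 - 1) else none)

-- loop body of B: emit-and-clear on a mempool line / enqueue on a blockchain line, then decrement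
def pvStepB (st : List (String × Int) × List (String × String)) (line : String) :
    List (String × Int) × List (String × String) :=
  if PySem.Str.startswith line pvMempoolPrefix then
    (pvDec [], st.2 ++ st.1.map (fun e => (e.1, line)))
  else if PySem.Str.startswith line pvBlockchainPrefix then
    (pvDec (st.1 ++ [(line, (4 : Int))]), st.2)
  else (pvDec st.1, st.2)

def iter_snapshot_pairs_py_alt (lines : List String) : List (String × String) :=
  (lines.foldl pvStepB ([], [])).2

-- ===== PRECONDITION & SPEC =====
def Spec_iter_snapshot_pairs_py (lines : List String) (out : List (String × String)) : Prop := out = iter_snapshot_pairs_py_alt lines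
instance (lines : List String) (out : List (String × String)) : Decidable (Spec_iter_snapshot_pairs_py lines out) := by unfold Spec_iter_snapshot_pairs_py; infer_instance

-- ===== CLAIM (what is proved, stated in full; the proofs are below) =====
def Claim_equal_iter_snapshot_pairs_py : Prop := ∀ (lines : List String), Dom_iter_snapshot_pairs_py lines → Spec_iter_snapshot_pairs_py lines (iter_snapshot_pairs_py lines)

-- ===== LEMMAS AND PROOFS =====

-- the common suffix-recursive characterisation both ports are reduced to
def pvRec : List String → List (String × String)
  | [] => []
  | l :: t =>
    if PySem.Str.startswith l pvBlockchainPrefix then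
      match (t.take 3).find? (fun c => PySem.Str.startswith c pvMempoolPrefix) with
      | some m => (l, m) :: pvRec t
      | none => pvRec t
    else pvRec t

theorem pvRec_cons (l : String) (t : List String) :
    pvRec (l :: t)
      = if PySem.Str.startswith l pvBlockchainPrefix then
          match (t.take 3).find? (fun c => PySem.Str.startswith c pvMempoolPrefix) with
          | some m => (l, m) :: pvRec t
          | none => pvRec t
        else pvRec t := rfl

-- the two prefixes are incompatible (they differ at the first character)
theorem pv_mp_not_bc (s : String) (h : PySem.Str.startswith s pvMempoolPrefix = true) :
    PySem.Str.startswith s pvBlockchainPrefix = false := by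
  simp only [PySem.Str.startswith_eq, PySem.Chars.startswith, pvMempoolPrefix,
    pvBlockchainPrefix] at h ⊢
  rw [List.isPrefixOf_iff_prefix] at h
  rw [Bool.eq_false_iff, Ne, List.isPrefixOf_iff_prefix]
  intro hbc
  rcases h with ⟨u, hu⟩
  rcases hbc with ⟨v, hv⟩
  rw [← hv] at hu
  rw [show "mempool=MemPool {".toList = 'm' :: "empool=MemPool {".toList by decide,
     show "BlockChain {".toList = 'B' :: "lockChain {".toList by decide] at hu
  simp at hu

-- ===== A = pvRec =====

theorem pvA_fold (L : List String) :
    ∀ (suf pre : List String) (acc : List (String × String)), L = pre ++ suf →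
      (PySem.List.enumerate suf (pre.length : Int)).foldl (pvStepA L) acc
        = acc ++ pvRec suf := by
  intro suf
  induction suf with
  | nil => intro pre acc _; simp [PySem.List.enumerate, pvRec]
  | cons l t ih =>
    intro pre acc hL
    rw [PySem.List.enumerate_cons, List.foldl_cons]
    have hslice : PySem.List.slice L (some ((pre.length : Int) + 1)) (some ((pre.length : Int) + 4))
        = t.take 3 := by
      have h1 : ((pre.length : Int) + 1) = ((pre.length + 1 : Nat) : Int) := by push_cast; ring
      have h4 : ((pre.length : Int) + 4) = ((pre.length + 4 : Nat) : Int) := by push_cast; ring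
      rw [h1, h4, PySem.List.slice_natCast]
      have hdrop : L.drop (pre.length + 1) = t := by
        rw [hL, show pre ++ l :: t = (pre ++ [l]) ++ t by simp,
          List.drop_append_of_le_length (by simp)]
        simp
      rw [hdrop]
      congr 1
      omega
    have hrec : ((pre.length : Int) + 1) = (((pre ++ [l]).length : Nat) : Int) := by
      simp
    by_cases hbc : PySem.Str.startswith l pvBlockchainPrefix
    · have hstepEq : pvStepA L acc ((pre.length : Int), l)
          = match (t.take 3).find? (fun c => PySem.Str.startswith c pvMempoolPrefix) with
            | none => acc
            | some m => acc ++ [(l, m)] := by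
        unfold pvStepA
        rw [if_neg (by simp only [not_not]; exact hbc), hslice]
      cases hfind : (t.take 3).find? (fun c => PySem.Str.startswith c pvMempoolPrefix) with
      | none =>
        rw [hfind] at hstepEq
        rw [hstepEq, hrec, ih (pre ++ [l]) acc (by simp [hL])]
        rw [pvRec_cons, if_pos hbc, hfind]
      | some m =>
        rw [hfind] at hstepEq
        rw [hstepEq, hrec, ih (pre ++ [l]) (acc ++ [(l, m)]) (by simp [hL])]
        rw [pvRec_cons, if_pos hbc, hfind]
        simp
    · have hstepEq : pvStepA L acc ((pre.length : Int), l) = acc := by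
        unfold pvStepA
        rw [if_pos hbc]
      rw [hstepEq, hrec, ih (pre ++ [l]) acc (by simp [hL])]
      rw [pvRec_cons, if_neg hbc]

theorem pvA_eq_rec (lines : List String) : iter_snapshot_pairs_py lines = pvRec lines := by
  have h := pvA_fold lines lines [] [] rfl
  simpa [iter_snapshot_pairs_py] using h

-- ===== B = pvRec =====

-- what a pending entry will eventually emit, reading the remaining suffix
def pvEmit (t : List String) (e : String × Int) : Option (String × String) :=
  ((t.take e.2.toNat).find? (fun c => PySem.Str.startswith c pvMempoolPrefix)).map
    (fun m => (e.1, m))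

theorem pvDec_mem_pos (p : List (String × Int)) (e : String × Int) (he : e ∈ pvDec p) :
    1 ≤ e.2 := by
  simp only [pvDec, List.mem_filterMap] at he
  rcases he with ⟨a, _, ha⟩
  split at ha
  · cases ha; simp; omega
  · cases ha

theorem pvEmit_mp (l : String) (t : List String)
    (hmp : PySem.Str.startswith l pvMempoolPrefix = true) :
    ∀ (p : List (String × Int)), (∀ e ∈ p, 1 ≤ e.2) →
      p.filterMap (pvEmit (l :: t)) = p.map (fun e => (e.1, l)) := by
  intro p
  induction p with
  | nil => intro _; simp
  | cons e p ih =>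
    intro hp
    have he : 1 ≤ e.2 := hp e (by simp)
    have hemit : pvEmit (l :: t) e = some (e.1, l) := by
      have ht : (l :: t).take e.2.toNat = l :: t.take (e.2.toNat - 1) := by
        rw [show e.2.toNat = (e.2.toNat - 1) + 1 by omega]
        rfl
      unfold pvEmit
      rw [ht, List.find?_cons_of_pos (p := fun c => PySem.Str.startswith c pvMempoolPrefix) hmp]
      rfl
    simp only [List.filterMap_cons, hemit, List.map_cons]
    rw [ih (fun x hx => hp x (by simp [hx]))]

theorem pvEmit_dec (l : String) (t : List String)
    (hmp : PySem.Str.startswith l pvMempoolPrefix = false) :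
    ∀ (p : List (String × Int)), (∀ e ∈ p, 1 ≤ e.2) →
      (pvDec p).filterMap (pvEmit t) = p.filterMap (pvEmit (l :: t)) := by
  intro p
  induction p with
  | nil => intro _; simp [pvDec]
  | cons e p ih =>
    intro hp
    have he : 1 ≤ e.2 := hp e (by simp)
    have hrest := ih (fun x hx => hp x (by simp [hx]))
    simp only [pvDec, List.filterMap_cons] at hrest ⊢
    by_cases h1 : 1 < e.2
    · simp only [h1, if_true, List.filterMap_cons]
      have hemit : pvEmit (l :: t) e = pvEmit t (e.1, e.2 - 1) := by
        have ht : (l :: t).take e.2.toNat = l :: t.take ((e.2 - 1).toNat) := by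
          rw [show e.2.toNat = (e.2 - 1).toNat + 1 by omega]
          rfl
        unfold pvEmit
        rw [ht, List.find?_cons_of_neg (p := fun c => PySem.Str.startswith c pvMempoolPrefix) (by simp only []; rw [hmp]; simp)]
      rw [hemit, hrest]
    · have hemit : pvEmit (l :: t) e = none := by
        have ht : (l :: t).take e.2.toNat = [l] := by
          rw [show e.2.toNat = 1 by omega]
          rfl
        unfold pvEmit
        rw [ht, show List.find? (fun c => PySem.Str.startswith c pvMempoolPrefix) [l] = none by
          rw [List.find?_cons_of_neg (p := fun c => PySem.Str.startswith c pvMempoolPrefix) (by simp only []; rw [hmp]; simp)]; rfl]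
        rfl
      simp only [h1, if_false, hemit]
      rw [hrest]

theorem pvB_fold :
    ∀ (suf : List String) (pending : List (String × Int)) (acc : List (String × String)),
      (∀ e ∈ pending, 1 ≤ e.2) →
      (suf.foldl pvStepB (pending, acc)).2
        = acc ++ pending.filterMap (pvEmit suf) ++ pvRec suf := by
  intro suf
  induction suf with
  | nil =>
    intro pending acc _
    have hnone : pending.filterMap (pvEmit []) = [] := by
      apply List.filterMap_eq_nil_iff.mpr
      intro e _; simp [pvEmit]
    simp [hnone, pvRec]
  | cons l t ih =>
    intro pending acc hp
    rw [List.foldl_cons]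
    by_cases hmp : PySem.Str.startswith l pvMempoolPrefix
    · have hstep : pvStepB (pending, acc) l
          = (pvDec [], acc ++ pending.map (fun e => (e.1, l))) := by
        unfold pvStepB
        rw [if_pos hmp]
      rw [hstep, show pvDec ([] : List (String × Int)) = [] from rfl,
        ih [] _ (by simp)]
      rw [pvRec_cons, if_neg (by rw [pv_mp_not_bc l hmp]; simp)]
      rw [pvEmit_mp l t hmp pending hp]
      simp
    · have hmp' : PySem.Str.startswith l pvMempoolPrefix = false := by
        simpa using hmp
      by_cases hbc : PySem.Str.startswith l pvBlockchainPrefix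
      · have hstep : pvStepB (pending, acc) l
            = (pvDec (pending ++ [(l, (4 : Int))]), acc) := by
          unfold pvStepB
          rw [if_neg hmp, if_pos hbc]
        rw [hstep, ih _ _ (fun e he => pvDec_mem_pos _ e he)]
        have hsplit : pvDec (pending ++ [(l, (4 : Int))])
            = pvDec pending ++ [(l, (3 : Int))] := by
          unfold pvDec
          rw [List.filterMap_append]
          norm_num [List.filterMap_cons]
        rw [hsplit, List.filterMap_append, pvEmit_dec l t hmp' pending hp]
        have hl3 : ([(l, (3 : Int))] : List (String × Int)).filterMap (pvEmit t)
            = (((t.take 3).find? (fun c => PySem.Str.startswith c pvMempoolPrefix)).map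
                (fun m => (l, m))).toList := by
          simp [pvEmit]
          rfl
        rw [hl3, pvRec_cons, if_pos hbc]
        cases hfind : (t.take 3).find? (fun c => PySem.Str.startswith c pvMempoolPrefix) with
        | none => simp
        | some m => simp
      · have hstep : pvStepB (pending, acc) l = (pvDec pending, acc) := by
          unfold pvStepB
          rw [if_neg hmp, if_neg hbc]
        rw [hstep, ih _ _ (fun e he => pvDec_mem_pos _ e he),
          pvEmit_dec l t hmp' pending hp, pvRec_cons, if_neg hbc]

theorem pvB_eq_rec (lines : List String) : iter_snapshot_pairs_py_alt lines = pvRec lines := by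
  have h := pvB_fold lines [] [] (by simp)
  simpa [iter_snapshot_pairs_py_alt] using h

-- ===== VERDICT (by name: the statement is the Claim_ definition above) =====
theorem iter_snapshot_pairs_py_spec : Claim_equal_iter_snapshot_pairs_py := by
  intro lines _
  unfold Spec_iter_snapshot_pairs_py
  rw [pvA_eq_rec, pvB_eq_rec]
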